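-- pv_equiv track=rewrite | github.com/daniel-reich/turbo-robot | kAQT4vMX2iEAcs8uJ_14.py | longest_7segment_word
-- ===== SOURCE A (Python) =====
-- def longest_7segment_word(lst):
--   qualifies = []
--   for word in lst:
--     nogood = False
--     for letter in word:
--       if letter in ['k', 'v', 'm', 'w', 'x']:
--         nogood = True
--     if nogood:
--       continue
--     qualifies.append(word)
--   if qualifies:
--     temp = list(map(len, qualifies))
--     return qualifies[temp.index(max(temp))]
--   else:
--     return ""
-- ===== SOURCE B (Python) =====
-- def longest_7segment_word(lst):
--     bad = set('kvmwx')
--     best = None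
--     best_len = -1
--     for word in lst:
--         if any(ch in bad for ch in word):
--             continue
--         if best is None or len(word) > best_len:
--             best = word
--             best_len = len(word)
--     return best if best is not None else ''
-- ===== Notes on version B (the rewrite author's own statement) =====
-- stated objective: simpler
-- what changed: Replaces A's three passes (build a filtered list, map lengths, index-of-max then re-index) with one fused traversal maintaining the running best word and its length (strict > keeps the first longest on ties).
import Mathlib
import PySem

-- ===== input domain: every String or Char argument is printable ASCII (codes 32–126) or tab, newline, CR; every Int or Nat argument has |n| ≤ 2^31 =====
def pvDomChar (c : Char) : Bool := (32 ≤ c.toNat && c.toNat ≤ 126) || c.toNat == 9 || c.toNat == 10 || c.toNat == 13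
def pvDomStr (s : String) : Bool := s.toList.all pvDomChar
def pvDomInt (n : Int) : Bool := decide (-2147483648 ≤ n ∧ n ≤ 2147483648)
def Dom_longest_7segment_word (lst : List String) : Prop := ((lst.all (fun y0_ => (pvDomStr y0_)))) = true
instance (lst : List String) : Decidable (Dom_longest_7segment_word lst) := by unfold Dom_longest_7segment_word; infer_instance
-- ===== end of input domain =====

-- B fuses A's three passes (filter list, lengths list, index-of-max then re-index) into one traversal with a running best; return values proved equal.

-- ===== PORT A =====
def longest_7segment_word (lst : List String) : String :=
  let qualifies : List String := lst.foldl (fun acc word =>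
    let nogood := word.toList.foldl
      (fun ng letter => if letter ∈ ['k', 'v', 'm', 'w', 'x'] then true else ng) false
    if nogood then acc else acc ++ [word]) []
  if qualifies ≠ [] then
    let temp := qualifies.map PySem.Str.len
    match PySem.List.max? temp (fun x => x) with
    | some m =>
      match PySem.List.index? temp m with
      | some i => (PySem.List.pyGet? qualifies (i : Int)).getD ""
      | none => ""
    | none => ""
  else ""

-- ===== PORT B =====
-- bad = set('kvmwx')
def pvBadSet : PySem.Set Char := PySem.Set.ofList ['k', 'v', 'm', 'w', 'x']

-- the body of B's single loop: skip bad words, else keep the running (best, best_len)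
def pvStep (st : Option String × Int) (word : String) : Option String × Int :=
  if word.toList.any (fun ch => ch ∈ pvBadSet) then st
  else
    match st with
    | (none, _) => (some word, PySem.Str.len word)
    | (some b, bl) =>
      if PySem.Str.len word > bl then (some word, PySem.Str.len word) else (some b, bl)

def longest_7segment_word_alt (lst : List String) : String :=
  match (lst.foldl pvStep (none, -1)).1 with
  | some b => b
  | none => ""

-- ===== PRECONDITION & SPEC =====
def Spec_longest_7segment_word (lst : List String) (out : String) : Prop := out = longest_7segment_word_alt lst
instance (lst : List String) (out : String) : Decidable (Spec_longest_7segment_word lst out) := by unfold Spec_longest_7segment_word; infer_instance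

-- ===== CLAIM (what is proved, stated in full; the proofs are below) =====
def Claim_equal_longest_7segment_word : Prop := ∀ (lst : List String), Dom_longest_7segment_word lst → Spec_longest_7segment_word lst (longest_7segment_word lst)

-- ===== LEMMAS AND PROOFS =====

def pvBad (c : Char) : Bool := c ∈ (['k', 'v', 'm', 'w', 'x'] : List Char)

lemma pvAny_eq (l : List Char) :
    (l.any fun ch => ch ∈ pvBadSet) = l.any pvBad := by
  apply PySem.List.any_congr_mem
  intro c _
  simp [pvBadSet, pvBad, PySem.Set.mem_ofList]

lemma pvStep_skip (st : Option String × Int) (word : String)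
    (h : word.toList.any pvBad = true) : pvStep st word = st := by
  simp [pvStep, pvAny_eq, h]

lemma pvStep_some (b : String) (bl : Int) (word : String)
    (h : word.toList.any pvBad = false) :
    pvStep (some b, bl) word
      = if PySem.Str.len word > bl then (some word, PySem.Str.len word) else (some b, bl) := by
  simp [pvStep, pvAny_eq, h]

lemma pvStep_none (bl : Int) (word : String)
    (h : word.toList.any pvBad = false) :
    pvStep (none, bl) word = (some word, PySem.Str.len word) := by
  simp [pvStep, pvAny_eq, h]

-- inner loop of A = any
lemma pvA_inner (l : List Char) (b : Bool) :
    l.foldl (fun ng letter => if letter ∈ ['k', 'v', 'm', 'w', 'x'] then true else ng) b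
      = (b || l.any pvBad) := by
  induction l generalizing b with
  | nil => simp
  | cons c t ih =>
    simp only [List.foldl_cons, List.any_cons, ih, pvBad]
    by_cases h : c ∈ (['k', 'v', 'm', 'w', 'x'] : List Char) <;> simp [h]

-- A's loop body, with its inner letter loop replaced by any (pvA_inner)
lemma pvA_lam :
    (fun acc word =>
      let nogood := (word : String).toList.foldl
        (fun ng letter => if letter ∈ ['k', 'v', 'm', 'w', 'x'] then true else ng) false
      if nogood then acc else acc ++ [word])
    = (fun (acc : List String) word => if word.toList.any pvBad then acc else acc ++ [word]) := by
  funext acc word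
  rw [pvA_inner]
  simp

-- A's accumulator loop builds the filtered list
lemma pvA_filter (lst : List String) (acc : List String) :
    lst.foldl (fun acc word =>
      let nogood := word.toList.foldl
        (fun ng letter => if letter ∈ ['k', 'v', 'm', 'w', 'x'] then true else ng) false
      if nogood then acc else acc ++ [word]) acc
    = acc ++ lst.filter (fun w => !w.toList.any pvBad) := by
  rw [pvA_lam]
  induction lst generalizing acc with
  | nil => simp
  | cons w t ih =>
    simp only [List.foldl_cons, List.filter_cons]
    by_cases h : w.toList.any pvBad
    · rw [if_pos h, ih]; simp [h]
    · rw [if_neg h, ih]; simp [h]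

-- B's skip makes its loop a loop over the filtered list
lemma pvB_filter (lst : List String) (st : Option String × Int) :
    lst.foldl pvStep st
      = (lst.filter (fun w => !w.toList.any pvBad)).foldl pvStep st := by
  induction lst generalizing st with
  | nil => rfl
  | cons w t ih =>
    simp only [List.foldl_cons, List.filter_cons]
    by_cases h : w.toList.any pvBad
    · simp [h, pvStep_skip _ _ h, ih]
    · simp [h, ih]

-- selection: first element of maximal length
def pvSel (b : String) : List String → String
  | [] => b
  | w :: ws => if PySem.Str.len w > PySem.Str.len b then pvSel w ws else pvSel b ws

lemma pvB_run (ws : List String) (b : String)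
    (hg : ∀ x ∈ ws, x.toList.any pvBad = false) :
    ws.foldl pvStep (some b, PySem.Str.len b)
      = (some (pvSel b ws), PySem.Str.len (pvSel b ws)) := by
  induction ws generalizing b with
  | nil => rfl
  | cons w t ih =>
    have hw : w.toList.any pvBad = false := hg w (by simp)
    have ht : ∀ x ∈ t, x.toList.any pvBad = false := fun x hx => hg x (by simp [hx])
    simp only [List.foldl_cons, pvStep_some _ _ _ hw, pvSel]
    by_cases h : PySem.Str.len w > PySem.Str.len b
    · rw [if_pos h, if_pos h]; exact ih w ht
    · rw [if_neg h, if_neg h]; exact ih b ht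

lemma pvFoldlMax_ge (t : List Int) (a : Int) : a ≤ t.foldl max a := by
  induction t generalizing a with
  | nil => simp
  | cons x xs ih => exact le_trans (le_max_left a x) (ih (max a x))

-- index-of-max selection = find? of the first element with that length
lemma pvIndexGet (q : List String) (m : Int) :
    (match PySem.List.index? (q.map PySem.Str.len) m with
      | some i => (PySem.List.pyGet? q (i : Int)).getD ""
      | none => "")
    = ((q.find? (fun x => PySem.Str.len x == m)).getD "") := by
  induction q with
  | nil => rfl
  | cons w ws ih =>
    by_cases h : PySem.Str.len w = m
    · subst h
      rw [List.map_cons, PySem.List.index?_cons_self]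
      simp [List.find?]
    · rw [List.map_cons, PySem.List.index?_cons_of_ne _ h]
      have hf : (PySem.Str.len w == m) = false := by simpa [PySem.Str.len] using h
      simp only [List.find?, hf]
      cases hidx : PySem.List.index? (ws.map PySem.Str.len) m with
      | none => rw [hidx] at ih; simpa using ih
      | some i =>
        rw [hidx] at ih
        simp only [Option.map_some]
        have hc : ((i + 1 : Nat) : Int) = (i : Int) + 1 := by push_cast; ring
        rw [hc, PySem.List.pyGet?_cons_succ]
        exact ih

lemma pvSel_find (ws : List String) (b : String) :
    pvSel b ws
      = (((b :: ws).find? (fun x =>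
            PySem.Str.len x == (ws.map PySem.Str.len).foldl max (PySem.Str.len b))).getD "") := by
  induction ws generalizing b with
  | nil => simp [pvSel, List.find?]
  | cons v vs ih =>
    simp only [pvSel, List.map_cons, List.foldl_cons]
    by_cases h : PySem.Str.len v > PySem.Str.len b
    · rw [if_pos h, ih v]
      have hmax : max (PySem.Str.len b) (PySem.Str.len v) = PySem.Str.len v := by omega
      rw [hmax]
      have hbb : (PySem.Str.len b == (vs.map PySem.Str.len).foldl max (PySem.Str.len v)) = false := by
        have := pvFoldlMax_ge (vs.map PySem.Str.len) (PySem.Str.len v)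
        simp only [beq_eq_false_iff_ne, ne_eq]
        omega
      simp only [List.find?, hbb]
    · rw [if_neg h, ih b]
      have hmax : max (PySem.Str.len b) (PySem.Str.len v) = PySem.Str.len b := by omega
      rw [hmax]
      set M := (vs.map PySem.Str.len).foldl max (PySem.Str.len b) with hM
      have hbM : PySem.Str.len b ≤ M := pvFoldlMax_ge _ _
      by_cases hb : PySem.Str.len b = M
      · have hbt : (PySem.Str.len b == M) = true := by simpa [PySem.Str.len] using hb
        simp only [List.find?, hbt]
      · have hbt : (PySem.Str.len b == M) = false := by simpa [PySem.Str.len] using hb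
        have hvt : (PySem.Str.len v == M) = false := by
          simp only [beq_eq_false_iff_ne, ne_eq]; omega
        simp only [List.find?, hbt, hvt]

-- ===== VERDICT (by name: the statement is the Claim_ definition above) =====
theorem longest_7segment_word_spec : Claim_equal_longest_7segment_word := by
  intro lst _
  unfold Spec_longest_7segment_word longest_7segment_word longest_7segment_word_alt
  rw [pvB_filter lst]
  simp only [pvA_filter, List.nil_append]
  cases hq : lst.filter (fun w => !w.toList.any pvBad) with
  | nil => rfl
  | cons w ws =>
    have hall : ∀ x ∈ w :: ws, x.toList.any pvBad = false := by
      intro x hx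
      have : x ∈ lst.filter (fun w => !w.toList.any pvBad) := hq ▸ hx
      simpa using List.of_mem_filter this
    have hw : w.toList.any pvBad = false := hall w (by simp)
    have hws : ∀ x ∈ ws, x.toList.any pvBad = false := fun x hx => hall x (by simp [hx])
    simp only [ne_eq, reduceCtorEq, not_false_eq_true, if_pos, pvIndexGet]
    simp only [List.map_cons]
    rw [PySem.List.max?_id_cons]
    simp only [List.foldl_cons, pvStep_none _ _ hw, pvB_run ws w hws]
    rw [pvSel_find]
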